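-- pv_equiv track=rewrite | github.com/sagemath/sage-archive-2023-02-01 | src/sage/combinat/vector_partition.py | IntegerVectorsIterator
-- ===== SOURCE A (Python) =====
-- def IntegerVectorsIterator(vect, min = None):
--     """
--     Return an iterator over the list of integer vectors which are componentwise
--     less than or equal to ``vect``, and lexicographically greater than or equal
--     to ``min``.
--
--     INPUT:
--
--     - ``vect`` -- A list of non-negative integers
--     - ``min`` -- A list of non-negative integers dominated elementwise by ``vect``
--
--     OUTPUT:
--
--     A list in lexicographic order of all integer vectors (as lists) which are
--     dominated elementwise by ``vect`` and are greater than or equal to ``min`` in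
--     lexicographic order.
--
--     EXAMPLES::
--
--         sage: from sage.combinat.vector_partition import IntegerVectorsIterator
--         sage: list(IntegerVectorsIterator([1, 1]))
--         [[0, 0], [0, 1], [1, 0], [1, 1]]
--
--         sage: list(IntegerVectorsIterator([1, 1], min = [1, 0]))
--         [[1, 0], [1, 1]]
--     """
--     vect = list(vect)
--     if not vect:
--         yield []
--     else:
--         if min is None:
--             min = [0] * len(vect)
--         if vect < min:
--             return
--         else:
--             for vec in IntegerVectorsIterator(vect[1:], min=min[1:]):
--                 yield [min[0]] + vec
--             for j in range(min[0] + 1, vect[0] + 1):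
--                 for vec in IntegerVectorsIterator(vect[1:]):
--                     yield [j] + vec
-- ===== SOURCE B (Python) =====
-- def IntegerVectorsIterator(vect, min=None):
--     """Iterative block decomposition: emit min itself, then for each prefix
--     length k (longest first) the block min[:k] + [j] + free tail, sharing one
--     incrementally-built product list of free tails across all j and k, and
--     building it only down to the shallowest non-empty block."""
--     vect = list(vect)
--     n = len(vect)
--     if n == 0:
--         yield []
--         return
--     mn = [0] * n if min is None else list(min)
--     # cut = first level whose lex check fails in the fixed-prefix chain
--     cut = n
--     for k in range(n):
--         if vect[k:] < mn[k:]: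
--             cut = k
--             break
--     if cut == n:
--         yield mn[:n]
--     # kmin = shallowest level with a non-empty block
--     kmin = n
--     for k in range(cut):
--         if mn[k] < vect[k]:
--             kmin = k
--             break
--     prods = [[]]  # lex-ordered product of ranges over positions > k
--     for k in range(n - 1, kmin - 1, -1):
--         if k < cut and mn[k] < vect[k]:
--             pre = mn[:k]
--             for j in range(mn[k] + 1, vect[k] + 1):
--                 for p in prods:
--                     yield pre + [j] + p
--         if k > kmin:
--             new = []
--             for t in range(vect[k] + 1):
--                 for p in prods:
--                     new.append([t] + p)
--             prods = new
-- ===== Notes on version B (the rewrite author's own statement) =====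
-- stated objective: alternative
-- what changed: A's recursive generator (which re-enumerates the whole free suffix product from scratch for every value j at every recursion level and builds each output by repeated per-level list prepends) is replaced by an iterative block decomposition: one loop computes the lexicographic cutoff, then a single descending loop emits, per prefix length, blocks built from one shared, incrementally extended product list.
import Mathlib
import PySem

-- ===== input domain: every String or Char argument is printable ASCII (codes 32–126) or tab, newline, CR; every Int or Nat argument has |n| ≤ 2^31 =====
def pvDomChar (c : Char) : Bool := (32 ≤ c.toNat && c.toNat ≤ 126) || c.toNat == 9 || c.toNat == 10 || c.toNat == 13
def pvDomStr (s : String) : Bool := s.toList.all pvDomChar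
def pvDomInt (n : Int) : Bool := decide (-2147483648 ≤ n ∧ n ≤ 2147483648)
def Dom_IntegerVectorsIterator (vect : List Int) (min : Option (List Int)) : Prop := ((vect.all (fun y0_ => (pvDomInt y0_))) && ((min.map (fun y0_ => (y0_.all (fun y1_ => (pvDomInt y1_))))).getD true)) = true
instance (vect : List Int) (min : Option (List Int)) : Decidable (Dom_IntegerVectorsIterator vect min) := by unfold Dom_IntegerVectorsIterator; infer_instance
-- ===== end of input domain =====

-- B replaces A's recursive generator (which re-enumerates the free suffix product for every j at
-- every level) by one iterative block decomposition sharing a single incrementally built product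
-- list across all blocks; equivalence of return values is proved on Pre_ (A raises IndexError
-- outside it).

set_option maxRecDepth 32768


-- Python's list '<' on two int lists (exact lexicographic semantics of CPython); shared by both
-- ports because both Python sources use the builtin comparison.
def pyListLt : List Int → List Int → Bool
  | _, [] => false
  | [], _ :: _ => true
  | a :: as, b :: bs => if a < b then true else if b < a then false else pyListLt as bs

-- ===== PORT A =====
def IntegerVectorsIterator (vect : List Int) (min : Option (List Int)) : List (List Int) :=
  match vect with
  | [] => [[]]
  | v0 :: vs =>
    let mn := min.getD (List.replicate (vs.length + 1) 0)
    if pyListLt (v0 :: vs) mn then []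
    else
      ((IntegerVectorsIterator vs (some mn.tail)).map (fun vec => mn.headD 0 :: vec)) ++
        (PySem.List.pyRange (mn.headD 0 + 1) (v0 + 1) 1).flatMap
          (fun j => (IntegerVectorsIterator vs none).map (fun vec => j :: vec))

-- ===== PORT B =====
-- the 'cut' loop of Source B (first k with vect[k:] < mn[k:], else n), as the standard recursion
def bCut : List Int → List Int → Nat
  | [], _ => 0
  | v :: vs, ms => if pyListLt (v :: vs) ms then 0 else bCut vs ms.tail + 1

-- the kmin loop of Source B (first k < cut with mn[k] < vect[k], else n), as the standard recursion
def bKmin : List Int → List Int → Nat → Nat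
  | [], _, _ => 0
  | v :: vs, ms, cut => if 0 < cut ∧ ms.headD 0 < v then 0 else bKmin vs ms.tail (cut - 1) + 1

-- the descending-k loop of Source B, processed from the deep end: returns (emitted blocks, prods)
def bGo (mnFull : List Int) (cut kmin : Nat) : Nat → List Int → List (List Int) × List (List Int)
  | _, [] => ([], [[]])
  | k, v0 :: vs =>
    let r := bGo mnFull cut kmin (k + 1) vs
    (r.1 ++ (if k < cut ∧ mnFull.getD k 0 < v0 then
        (PySem.List.pyRange (mnFull.getD k 0 + 1) (v0 + 1) 1).flatMap
          (fun j => r.2.map (fun p => mnFull.take k ++ j :: p))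
      else []),
     if kmin < k then (PySem.List.pyRange 0 (v0 + 1) 1).flatMap (fun t => r.2.map (fun p => t :: p))
     else r.2)

def IntegerVectorsIterator_alt (vect : List Int) (min : Option (List Int)) : List (List Int) :=
  match vect with
  | [] => [[]]
  | _ :: _ =>
    let mn := min.getD (List.replicate vect.length 0)
    let cut := bCut vect mn
    let kmin := bKmin vect mn cut
    (if cut = vect.length then [mn.take vect.length] else []) ++
      (bGo mn cut kmin kmin (vect.drop kmin)).1

-- ===== PRECONDITION & SPEC =====
-- Pre_ excludes exactly the inputs where A raises IndexError: a given min strictly shorter than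
-- vect with no earlier lexicographic cutoff 'vect[i:] < min[i:]' returning first.
def Pre_IntegerVectorsIterator (vect : List Int) (min : Option (List Int)) : Prop :=
  match min with
  | none => True
  | some m => vect.length ≤ m.length ∨ ∃ i < m.length, List.Lex (· < ·) (vect.drop i) (m.drop i)

instance (vect : List Int) (min : Option (List Int)) : Decidable (Pre_IntegerVectorsIterator vect min) := by
  unfold Pre_IntegerVectorsIterator; cases min <;> infer_instance

def pvWitness_IntegerVectorsIterator : List Int × Option (List Int) := ([1, 1], some [1, 0])

def Spec_IntegerVectorsIterator (vect : List Int) (min : Option (List Int)) (out : List (List Int)) : Prop := out = IntegerVectorsIterator_alt vect min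
instance (vect : List Int) (min : Option (List Int)) (out : List (List Int)) : Decidable (Spec_IntegerVectorsIterator vect min out) := by unfold Spec_IntegerVectorsIterator; infer_instance

-- ===== CLAIM (what is proved, stated in full; the proofs are below) =====
def Claim_equal_IntegerVectorsIterator : Prop := ∀ (vect : List Int) (min : Option (List Int)), Dom_IntegerVectorsIterator vect min → Pre_IntegerVectorsIterator vect min → Spec_IntegerVectorsIterator vect min (IntegerVectorsIterator vect min)

-- ===== LEMMAS AND PROOFS =====

-- pyListLt is Mathlib's lexicographic order (used to read Pre_ back into the ports' comparison)
theorem pyListLt_iff_lex (xs : List Int) : ∀ ys, pyListLt xs ys = true ↔ List.Lex (· < ·) xs ys := by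
  induction xs with
  | nil => intro ys; cases ys <;> simp [pyListLt]
  | cons a as ih =>
    intro ys
    cases ys with
    | nil => simp [pyListLt]
    | cons b bs =>
      simp only [pyListLt, List.cons_lex_cons_iff, ← ih]
      by_cases h1 : a < b
      · simp [h1]
      · by_cases h2 : b < a
        · simp [h1, h2]; omega
        · have hab : a = b := by omega
          simp [hab]

-- free product of ranges [0..v_i], in lex order (proof-side characterisation)
def prodList : List Int → List (List Int)
  | [] => [[]]
  | v :: vs => (PySem.List.pyRange 0 (v + 1) 1).flatMap (fun t => (prodList vs).map (fun p => t :: p))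

-- bGo with the already-emitted prefix stripped (proof-side)
def relGo : Nat → List Int → List Int → List (List Int) × List (List Int)
  | _, [], _ => ([], [[]])
  | cut, v0 :: vs, ms =>
    let r := relGo (cut - 1) vs ms.tail
    ((r.1.map (fun p => ms.headD 0 :: p)) ++
      (if 0 < cut then
        (PySem.List.pyRange (ms.headD 0 + 1) (v0 + 1) 1).flatMap (fun j => r.2.map (fun p => j :: p))
      else []),
     (PySem.List.pyRange 0 (v0 + 1) 1).flatMap (fun t => r.2.map (fun p => t :: p)))

theorem relGo_snd (cut : Nat) (vs ms : List Int) : (relGo cut vs ms).2 = prodList vs := by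
  induction vs generalizing cut ms with
  | nil => simp [relGo, prodList]
  | cons v vs ih => simp only [relGo, prodList, ih]

theorem relGo_zero_fst (vs ms : List Int) : (relGo 0 vs ms).1 = [] := by
  induction vs generalizing ms with
  | nil => simp [relGo]
  | cons v vs ih => simp [relGo, ih]

theorem A_zero (vs : List Int) :
    IntegerVectorsIterator vs (some (List.replicate vs.length 0)) = IntegerVectorsIterator vs none := by
  cases vs <;> rfl

theorem prodList_nil_of_lt (vs : List Int) (h : pyListLt vs (List.replicate vs.length 0) = true) :
    prodList vs = [] := by
  induction vs with
  | nil => simp [pyListLt] at h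
  | cons v vs ih =>
    simp only [List.length_cons, List.replicate_succ, pyListLt] at h
    by_cases hv : v < 0
    · simp only [prodList]
      rw [PySem.List.pyRange_one_eq_nil (by omega)]
      simp
    · by_cases hv0 : (0 : Int) < v
      · simp [hv, hv0] at h
      · simp only [hv, hv0, if_false] at h
        simp [prodList, ih h]

theorem A_free (vs : List Int) : IntegerVectorsIterator vs none = prodList vs := by
  induction vs with
  | nil => simp [IntegerVectorsIterator, prodList]
  | cons v vs ih =>
    simp only [IntegerVectorsIterator, Option.getD_none, List.replicate_succ, List.tail_cons,
      List.headD_cons]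
    by_cases hv : v < 0
    · have hlt : pyListLt (v :: vs) (0 :: List.replicate vs.length 0) = true := by
        simp [pyListLt, hv]
      rw [if_pos hlt]
      simp only [prodList]
      rw [PySem.List.pyRange_one_eq_nil (by omega)]
      simp
    · by_cases h0 : pyListLt vs (List.replicate vs.length 0) = true
      · by_cases hv0 : (0 : Int) < v
        · have hlt : pyListLt (v :: vs) (0 :: List.replicate vs.length 0) = false := by
            simp [pyListLt, hv, hv0]
          rw [if_neg (by simp [hlt])]
          rw [A_zero, ih]
          have hnil : ∀ r : List Int, (r.flatMap fun _ => ([] : List (List Int))) = [] := by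
            intro r; simp [List.flatMap_eq_nil_iff]
          simp [prodList, prodList_nil_of_lt vs h0, hnil]
        · have hveq : v = 0 := by omega
          have hlt : pyListLt (v :: vs) (0 :: List.replicate vs.length 0) = true := by
            simp [pyListLt, hveq, h0]
          rw [if_pos hlt]
          simp [prodList, prodList_nil_of_lt vs h0, List.flatMap_eq_nil_iff]
      · have hlt : pyListLt (v :: vs) (0 :: List.replicate vs.length 0) = false := by
          by_cases hv0 : (0 : Int) < v <;> simp [pyListLt, hv, hv0, h0]
        rw [if_neg (by simp [hlt])]
        rw [A_zero, ih]
        simp only [prodList]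
        conv_rhs => rw [PySem.List.pyRange_one_cons (by omega : (0:Int) < v + 1)]
        simp

theorem main_lemma (vs : List Int) : ∀ ms : List Int,
    (vs.length ≤ ms.length ∨ ∃ i < ms.length, pyListLt (vs.drop i) (ms.drop i) = true) →
    IntegerVectorsIterator vs (some ms) =
      (if bCut vs ms = vs.length then [ms.take vs.length] else []) ++ (relGo (bCut vs ms) vs ms).1 := by
  induction vs with
  | nil =>
    intro ms h
    simp [IntegerVectorsIterator, bCut, relGo]
  | cons v vs ih =>
    intro ms h
    by_cases hlt : pyListLt (v :: vs) ms = true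
    · simp only [IntegerVectorsIterator, Option.getD_some, hlt, if_true]
      have hc : bCut (v :: vs) ms = 0 := by simp [bCut, hlt]
      rw [hc, relGo_zero_fst]
      simp
    · obtain ⟨m0, ms', rfl⟩ : ∃ m0 ms', ms = m0 :: ms' := by
        cases ms with
        | nil =>
          exfalso
          rcases h with h | ⟨i, hi, _⟩
          · simp at h
          · simp at hi
        | cons a l => exact ⟨a, l, rfl⟩
      have h' : vs.length ≤ ms'.length ∨ ∃ i < ms'.length, pyListLt (vs.drop i) (ms'.drop i) = true := by
        rcases h with h | ⟨i, hi, hp⟩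
        · left; simpa using h
        · cases i with
          | zero => simp only [List.drop_zero] at hp; exact absurd hp hlt
          | succ i' => exact Or.inr ⟨i', by simpa using hi, by simpa using hp⟩
      have hc : bCut (v :: vs) (m0 :: ms') = bCut vs ms' + 1 := by simp [bCut, hlt]
      simp only [IntegerVectorsIterator, Option.getD_some, hlt, if_false, List.tail_cons,
        List.headD_cons, Bool.false_eq_true]
      rw [ih ms' h', A_free, hc]
      simp only [relGo, List.tail_cons, List.headD_cons, Nat.add_sub_cancel, relGo_snd,
        Nat.zero_lt_succ, if_true, List.length_cons]
      by_cases hc2 : bCut vs ms' = vs.length <;>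
        simp [hc2, List.take_succ_cons]

theorem getD_eq_headD_drop (l : List Int) (k : Nat) : l.getD k 0 = (l.drop k).headD 0 := by
  induction l generalizing k with
  | nil => simp
  | cons a l ih =>
    cases k with
    | zero => simp
    | succ k => simp

theorem bridge (mnFull : List Int) (cut kmin : Nat) (vs : List Int) : ∀ k : Nat, kmin ≤ k →
    (cut ≤ mnFull.length ∨ k + vs.length ≤ mnFull.length) →
    bGo mnFull cut kmin k vs =
      ((relGo (cut - k) vs (mnFull.drop k)).1.map (fun p => mnFull.take k ++ p),
       if kmin < k then prodList vs else prodList vs.tail) := by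
  induction vs with
  | nil => intro k hkm h; simp [bGo, relGo, prodList]
  | cons v vs ih =>
    intro k hkm h
    have h' : cut ≤ mnFull.length ∨ (k + 1) + vs.length ≤ mnFull.length := by
      rcases h with h | h
      · exact Or.inl h
      · right; simp at h; omega
    have IH := ih (k + 1) (by omega) h'
    have hsub : cut - (k + 1) = cut - k - 1 := by omega
    have htail : (mnFull.drop k).tail = mnFull.drop (k + 1) := by rw [List.tail_drop]
    have hk1 : kmin < k + 1 := by omega
    simp only [bGo, relGo, htail, ← hsub, IH, relGo_snd, hk1, if_true]
    by_cases hk : k < mnFull.length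
    · have hget : mnFull.getD k 0 = (mnFull.drop k).headD 0 := getD_eq_headD_drop _ _
      have hx : mnFull[k]? = some mnFull[k] := List.getElem?_eq_getElem hk
      have hh : (mnFull.drop k).headD 0 = mnFull[k] := by
        rw [List.headD_eq_head?_getD, List.head?_drop, hx]; rfl
      have htakeK : mnFull.take (k + 1) = mnFull.take k ++ [mnFull[k]] := by
        rw [List.take_add_one, hx]; rfl
      simp only [Prod.mk.injEq]
      refine ⟨?_, by simp [prodList]⟩
      rw [hget, hh]
      by_cases hcut : k < cut
      · have hcut2 : 0 < cut - k := by omega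
        by_cases hmv : mnFull[k] < v
        · rw [if_pos (⟨hcut, hmv⟩ : k < cut ∧ mnFull[k] < v), if_pos hcut2, List.map_append]
          congr 1
          · rw [List.map_map]
            apply List.map_congr_left
            intro p _
            simp only [Function.comp_apply]
            rw [htakeK, List.append_assoc, List.singleton_append]
          · rw [List.map_flatMap]
            congr 1
            funext j
            rw [List.map_map]
            apply List.map_congr_left
            intro p _
            simp
        · have hnil2 : PySem.List.pyRange (mnFull[k] + 1) (v + 1) 1 = [] :=
            PySem.List.pyRange_one_eq_nil (by omega)
          rw [if_neg (fun hco => hmv hco.2), if_pos hcut2, hnil2]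
          simp only [List.flatMap_nil, List.append_nil]
          rw [List.map_map]
          apply List.map_congr_left
          intro p _
          simp only [Function.comp_apply]
          rw [htakeK, List.append_assoc, List.singleton_append]
      · have hcut2 : ¬ 0 < cut - k := by omega
        rw [if_neg (fun hco => hcut hco.1), if_neg hcut2]
        simp only [List.append_nil]
        rw [List.map_map]
        apply List.map_congr_left
        intro p _
        simp only [Function.comp_apply]
        rw [htakeK, List.append_assoc, List.singleton_append]
    · have hck : cut ≤ k := by
        rcases h with h | h
        · omega
        · simp at h; omega
      have h01 : cut - (k + 1) = 0 := by omega
      have hncut : ¬ k < cut := by omega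
      have hncut2 : ¬ 0 < cut - k := by omega
      simp [h01, relGo_zero_fst, hncut, hncut2, prodList]

-- peeling the empty levels above kmin off the relative block list
theorem peel (vect : List Int) : ∀ (mn : List Int) (cut : Nat), cut ≤ mn.length →
    (relGo cut vect mn).1 =
      ((relGo (cut - bKmin vect mn cut) (vect.drop (bKmin vect mn cut))
          (mn.drop (bKmin vect mn cut))).1).map
        (fun p => mn.take (bKmin vect mn cut) ++ p) := by
  induction vect with
  | nil => intro mn cut h; simp [bKmin, relGo]
  | cons v vs ih =>
    intro mn cut h
    by_cases hc : 0 < cut ∧ mn.headD 0 < v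
    · have hk0 : bKmin (v :: vs) mn cut = 0 := by
        simp only [bKmin]; rw [if_pos hc]
      rw [hk0]
      simp
    · have hkm : bKmin (v :: vs) mn cut = bKmin vs mn.tail (cut - 1) + 1 := by
        simp only [bKmin]; rw [if_neg hc]
      cases mn with
      | nil =>
        have hc0 : cut = 0 := by simpa using h
        subst hc0
        simp [relGo_zero_fst]
      | cons m0 ms =>
        have h' : cut - 1 ≤ ms.length := by simp at h; omega
        have hblock : (relGo cut (v :: vs) (m0 :: ms)).1
            = ((relGo (cut - 1) vs ms).1).map (fun p => m0 :: p) := by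
          simp only [relGo, List.tail_cons, List.headD_cons]
          rcases Nat.eq_zero_or_pos cut with h0 | hpos
          · simp [h0]
          · have hmv : ¬ m0 < v := fun hlt => hc ⟨hpos, by simpa using hlt⟩
            rw [PySem.List.pyRange_one_eq_nil (by omega)]
            simp [hpos]
        rw [hblock, ih ms (cut - 1) h', hkm]
        have hsub2 : cut - (bKmin vs ms (cut - 1) + 1) = cut - 1 - bKmin vs ms (cut - 1) := by
          omega
        simp [hsub2, List.map_map, Function.comp_def, List.take_succ_cons, List.drop_succ_cons]

theorem bCut_le_length (vs ms : List Int) : bCut vs ms ≤ vs.length := by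
  induction vs generalizing ms with
  | nil => simp [bCut]
  | cons v vs ih =>
    simp only [bCut, List.length_cons]
    split
    · omega
    · have := ih ms.tail
      omega

theorem bCut_le_of_true (vs : List Int) : ∀ (ms : List Int) (i : Nat), i < vs.length →
    pyListLt (vs.drop i) (ms.drop i) = true → bCut vs ms ≤ i := by
  induction vs with
  | nil => intro ms i hi; simp at hi
  | cons v vs ih =>
    intro ms i hi hlt
    simp only [bCut]
    split
    · omega
    · rename_i hne
      cases i with
      | zero => simp at hlt; simp [hlt] at hne
      | succ i' =>
        have hd : ms.drop (i' + 1) = ms.tail.drop i' := by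
          rw [← List.drop_one, List.drop_drop, Nat.add_comm]
        rw [List.drop_succ_cons, hd] at hlt
        have := ih ms.tail i' (by simpa using hi) hlt
        omega

-- ===== VERDICT (by name: the statement is the Claim_ definition above) =====
theorem cut_le_len_of_pre (vect m : List Int)
    (h : vect.length ≤ m.length ∨ ∃ i < m.length, pyListLt (vect.drop i) (m.drop i) = true) :
    bCut vect m ≤ m.length := by
  rcases h with h | ⟨i, hi, hp⟩
  · exact le_trans (bCut_le_length vect m) h
  · by_cases hi2 : i < vect.length
    · exact le_trans (bCut_le_of_true vect m i hi2 hp) (le_of_lt hi)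
    · exact le_trans (bCut_le_length vect m) (by omega)

theorem alt_eq_main (vect m : List Int)
    (h : vect.length ≤ m.length ∨ ∃ i < m.length, pyListLt (vect.drop i) (m.drop i) = true) :
    IntegerVectorsIterator_alt vect (some m) = IntegerVectorsIterator vect (some m) := by
  cases vect with
  | nil => rfl
  | cons v vs =>
    have hcl : bCut (v :: vs) m ≤ m.length := cut_le_len_of_pre _ _ h
    rw [main_lemma (v :: vs) m h]
    simp only [IntegerVectorsIterator_alt, Option.getD_some]
    rw [bridge m (bCut (v :: vs) m) (bKmin (v :: vs) m (bCut (v :: vs) m))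
        ((v :: vs).drop (bKmin (v :: vs) m (bCut (v :: vs) m)))
        (bKmin (v :: vs) m (bCut (v :: vs) m)) (le_refl _) (Or.inl hcl)]
    rw [peel (v :: vs) m (bCut (v :: vs) m) hcl]

theorem IntegerVectorsIterator_spec : Claim_equal_IntegerVectorsIterator := by
  intro vect min _hdom hpre
  unfold Spec_IntegerVectorsIterator
  cases min with
  | none =>
    cases vect with
    | nil => rfl
    | cons v vs =>
      have hzero := A_zero (v :: vs)
      rw [← hzero]
      have halt : IntegerVectorsIterator_alt (v :: vs) none
          = IntegerVectorsIterator_alt (v :: vs) (some (List.replicate (v :: vs).length 0)) := by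
        simp [IntegerVectorsIterator_alt]
      rw [halt, alt_eq_main _ _ (Or.inl (by simp))]
  | some m =>
    have h : vect.length ≤ m.length ∨ ∃ i < m.length, pyListLt (vect.drop i) (m.drop i) = true := by
      have h0 : vect.length ≤ m.length ∨ ∃ i < m.length, List.Lex (· < ·) (vect.drop i) (m.drop i) := hpre
      simpa [pyListLt_iff_lex] using h0
    rw [alt_eq_main _ _ h]
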